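-- pv_equiv track=rewrite | github.com/languoqing/leetcode | islongpressname.py | countSingleWord
-- ===== SOURCE A (Python) =====
-- def countSingleWord(name):
--     count = 1
--     l = []
--     word1 = ''
--     for i in range(len(name)):
--         for y in range(len(name)):
--             if name[y] == name[i] and y == i + 1:
--                 i = y
--                 count += 1
--                 word1 = name[y]
--     return count,word1
-- ===== SOURCE B (Python) =====
-- def countSingleWord(name):
--     # count = 1 + number of ordered position pairs lying inside the same maximal
--     # run of equal characters; word1 = first character of the last run of length > 1.
--     count = 1
--     word1 = ''
--     rest = name
--     while rest:
--         L = 1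
--         while L < len(rest) and rest[L] == rest[0]:
--             L += 1
--         if L > 1:
--             count += L * (L - 1) // 2
--             word1 = rest[0]
--         rest = rest[L:]
--     return count, word1
-- ===== Notes on version B (the rewrite author's own statement) =====
-- stated objective: faster
-- what changed: Replaced the O(n^2) nested index scan by a run-length decomposition: an outer while loop jumps from one maximal run of equal characters to the next, adds each run's pair count L*(L-1)//2 in closed form, and records the last character of the last run longer than one.
import Mathlib
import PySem

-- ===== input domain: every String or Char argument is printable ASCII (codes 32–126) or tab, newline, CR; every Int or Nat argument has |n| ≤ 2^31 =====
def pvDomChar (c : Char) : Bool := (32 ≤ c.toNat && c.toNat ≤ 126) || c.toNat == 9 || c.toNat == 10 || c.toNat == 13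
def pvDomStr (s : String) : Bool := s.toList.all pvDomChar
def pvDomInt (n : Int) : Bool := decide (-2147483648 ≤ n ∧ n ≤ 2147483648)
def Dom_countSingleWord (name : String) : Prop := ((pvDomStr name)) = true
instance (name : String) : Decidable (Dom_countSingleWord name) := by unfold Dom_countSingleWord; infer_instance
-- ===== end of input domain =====

-- B replaces A's quadratic nested index scan by a linear run-length decomposition
-- with a closed-form pair count per run (objective: faster).

-- ===== PORT A =====
-- Literal port of A: nested loops over range(len(name)); the inner loop carries the
-- reassigned i together with count and word1; name[y] is in range (0 ≤ y < len), so
-- the .getD of the one-char string is never taken.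
def countSingleWord (name : String) : Int × String :=
  let cs := name.toList
  let n : Int := cs.length
  let st :=
    (PySem.List.pyRange 0 n 1).foldl
      (fun (st : Int × String) i =>
        let inner :=
          (PySem.List.pyRange 0 n 1).foldl
            (fun (st2 : Int × Int × String) y =>
              if PySem.List.pyGet? cs y = PySem.List.pyGet? cs st2.1 ∧ y = st2.1 + 1 then
                (y, st2.2.1 + 1, ((PySem.List.pyGet? cs y).map (fun c => String.mk [c])).getD "")
              else st2)
            (i, st.1, st.2)
        (inner.2.1, inner.2.2))
      ((1 : Int), "")
  (st.1, st.2)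

-- ===== PORT B =====
-- Port of B's inner while loop: 1 + the number of leading characters of t equal to ch
-- (i.e. the length L of the maximal run starting at rest[0]).
def pvRunLen (ch : Char) : List Char → Nat
  | [] => 0
  | c :: t => if c = ch then pvRunLen ch t + 1 else 0

-- Port of B's outer while loop over maximal runs, state (count, word1); 'rest = rest[L:]'
-- is List.drop L (exact for 0 ≤ L); the fuel (first argument) only makes the while loop
-- structural: every iteration drops at least one character, so cs.length fuel is never exhausted.
def pvRunLoopF : Nat → List Char → Int → String → Int × String
  | _, [], c, w => (c, w)
  | 0, _ :: _, c, w => (c, w)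
  | fuel + 1, ch :: t, c, w =>
      let L := pvRunLen ch t + 1
      if 1 < L then
        pvRunLoopF fuel ((ch :: t).drop L)
          (c + PySem.Int.floordiv ((L : Int) * ((L : Int) - 1)) 2)
          (String.mk [ch])
      else pvRunLoopF fuel ((ch :: t).drop L) c w

def countSingleWord_alt (name : String) : Int × String :=
  pvRunLoopF name.toList.length name.toList 1 ""

-- ===== PRECONDITION & SPEC =====
def Spec_countSingleWord (name : String) (out : Int × String) : Prop := out = countSingleWord_alt name
instance (name : String) (out : Int × String) : Decidable (Spec_countSingleWord name out) := by unfold Spec_countSingleWord; infer_instance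

-- ===== CLAIM (what is proved, stated in full; the proofs are below) =====
def Claim_equal_countSingleWord : Prop := ∀ (name : String), Dom_countSingleWord name → Spec_countSingleWord name (countSingleWord name)

-- ===== LEMMAS AND PROOFS =====

-- length of the chain of equal adjacent characters extending to the right of position i
def pvExt (cs : List Char) (i : Nat) : Nat :=
  if h : i + 1 < cs.length ∧ cs[i+1]? = cs[i]? then pvExt cs (i + 1) + 1 else 0
termination_by cs.length - i
decreasing_by omega

-- the one-character string Python's name[j] produces (j in range)
def pvWchar (cs : List Char) (j : Int) : String :=
  ((PySem.List.pyGet? cs j).map (fun c => String.mk [c])).getD ""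

-- the abstract effect of one outer iteration of A
def pvStepA (cs : List Char) (st : Int × String) (i : Int) : Int × String :=
  (st.1 + pvExt cs i.toNat,
   if pvExt cs i.toNat = 0 then st.2 else pvWchar cs ((i.toNat + pvExt cs i.toNat : Nat) : Int))

-- triangular numbers: pair count of a run of length L
def pvT : Nat → Nat
  | 0 => 0
  | L + 1 => L + pvT L

lemma pvExt_eq_zero (cs : List Char) (i : Nat) (h : ¬ (i + 1 < cs.length ∧ cs[i+1]? = cs[i]?)) :
    pvExt cs i = 0 := by
  rw [pvExt]; simp [h]

lemma pvExt_eq_succ (cs : List Char) (i : Nat) (h : i + 1 < cs.length ∧ cs[i+1]? = cs[i]?) :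
    pvExt cs i = pvExt cs (i + 1) + 1 := by
  rw [pvExt]; rw [dif_pos h]

-- A's inner loop over range(a, n) from state (i, c, w)
lemma pvInnerFold (cs : List Char) :
    ∀ (m : Nat) (a : Int) (i : Nat) (c : Int) (w : String),
      (((cs.length : Int) - a).toNat ≤ m) → 0 ≤ a →
      (PySem.List.pyRange a (cs.length : Int) 1).foldl
        (fun (st2 : Int × Int × String) y =>
          if PySem.List.pyGet? cs y = PySem.List.pyGet? cs st2.1 ∧ y = st2.1 + 1 then
            (y, st2.2.1 + 1, ((PySem.List.pyGet? cs y).map (fun c => String.mk [c])).getD "")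
          else st2)
        ((i : Int), c, w)
      = if a ≤ (i : Int) + 1 then
          (((i + pvExt cs i : Nat) : Int), c + pvExt cs i,
           if pvExt cs i = 0 then w else pvWchar cs ((i + pvExt cs i : Nat) : Int))
        else ((i : Int), c, w) := by
  intro m
  induction m with
  | zero =>
    intro a i c w hm ha
    have hna : (cs.length : Int) ≤ a := by omega
    rw [PySem.List.pyRange_one_eq_nil hna]
    simp only [List.foldl_nil]
    split
    · rename_i hle
      have he : pvExt cs i = 0 := pvExt_eq_zero cs i (by
        intro ⟨h1, _⟩; omega)
      simp [he]
    · rfl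
  | succ m ih =>
    intro a i c w hm ha
    by_cases hna : (cs.length : Int) ≤ a
    · rw [PySem.List.pyRange_one_eq_nil hna]
      simp only [List.foldl_nil]
      split
      · rename_i hle
        have he : pvExt cs i = 0 := pvExt_eq_zero cs i (by
          intro ⟨h1, _⟩; omega)
        simp [he]
      · rfl
    · have hlt : a < (cs.length : Int) := by omega
      rw [PySem.List.pyRange_one_cons hlt]
      simp only [List.foldl_cons]
      by_cases hfire : PySem.List.pyGet? cs a = PySem.List.pyGet? cs ((i : Int)) ∧ a = (i : Int) + 1
      · -- the pair at a = i+1 fires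
        have heq' : cs[i+1]? = cs[i]? := by
          have hthis := hfire.1
          rw [hfire.2] at hthis
          have h1 : ((i : Int) + 1) = ((i + 1 : Nat) : Int) := by push_cast; ring
          rw [h1, PySem.List.pyGet?_natCast, PySem.List.pyGet?_natCast] at hthis
          exact hthis
        have hilen : (i : Int) + 1 < (cs.length : Int) := by omega
        have hext : pvExt cs i = pvExt cs (i + 1) + 1 :=
          pvExt_eq_succ cs i ⟨by omega, heq'⟩
        rw [if_pos hfire]
        have hcast : a = ((i + 1 : Nat) : Int) := by push_cast; omega
        rw [hcast]
        rw [ih (((i + 1 : Nat) : Int) + 1) (i + 1) (c + 1) _ (by omega) (by omega)]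
        rw [if_pos (show ((i + 1 : Nat) : Int) + 1 ≤ ((i + 1 : Nat) : Int) + 1 by omega)]
        rw [if_pos (show ((i + 1 : Nat) : Int) ≤ (i : Int) + 1 by push_cast; omega)]
        rw [hext]
        have h1 : ((i + 1) + pvExt cs (i + 1) : Nat) = i + (pvExt cs (i + 1) + 1) := by omega
        rw [h1]
        rw [if_neg (Nat.succ_ne_zero (pvExt cs (i + 1)))]
        by_cases h0 : pvExt cs (i + 1) = 0
        · rw [if_pos h0, h0]
          simp [pvWchar]
        · rw [if_neg h0]
          refine Prod.ext rfl (Prod.ext ?_ rfl)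
          push_cast; ring
      · rw [if_neg hfire]
        by_cases hle : a ≤ (i : Int)
        · -- a < i+1 : no fire possible at a, continue with full information
          rw [ih (a + 1) i c w (by omega) (by omega)]
          rw [if_pos (show a + 1 ≤ (i : Int) + 1 by omega)]
          rw [if_pos (show a ≤ (i : Int) + 1 by omega)]
        · by_cases hai : a = (i : Int) + 1
          · -- equality test failed at a = i+1, so ext = 0; rest of range never fires
            have hne : ¬ (cs[i+1]? = cs[i]?) := by
              intro hcontra
              apply hfire
              constructor
              · rw [hai]
                have h1 : ((i : Int) + 1) = ((i + 1 : Nat) : Int) := by push_cast; ring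
                rw [h1, PySem.List.pyGet?_natCast, PySem.List.pyGet?_natCast]
                exact hcontra
              · exact hai
            have he : pvExt cs i = 0 := pvExt_eq_zero cs i (by intro ⟨_, h2⟩; exact hne h2)
            rw [ih (a + 1) i c w (by omega) (by omega)]
            rw [if_neg (show ¬ (a + 1 ≤ (i : Int) + 1) by omega)]
            rw [if_pos (show a ≤ (i : Int) + 1 by omega)]
            simp [he]
          · -- a > i+1 : unchanged
            rw [ih (a + 1) i c w (by omega) (by omega)]
            rw [if_neg (show ¬ (a + 1 ≤ (i : Int) + 1) by omega)]
            rw [if_neg (show ¬ (a ≤ (i : Int) + 1) by omega)]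

-- A's outer loop body equals the abstract step pvStepA
lemma pvOuterStep (cs : List Char) (st : Int × String) (x : Int) (hx : 0 ≤ x) :
    (let inner :=
        (PySem.List.pyRange 0 (cs.length : Int) 1).foldl
          (fun (st2 : Int × Int × String) y =>
            if PySem.List.pyGet? cs y = PySem.List.pyGet? cs st2.1 ∧ y = st2.1 + 1 then
              (y, st2.2.1 + 1, ((PySem.List.pyGet? cs y).map (fun c => String.mk [c])).getD "")
            else st2)
          (x, st.1, st.2);
      (inner.2.1, inner.2.2))
    = pvStepA cs st x := by
  obtain ⟨j, rfl⟩ : ∃ j : Nat, x = (j : Int) := ⟨x.toNat, (Int.toNat_of_nonneg hx).symm⟩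
  simp only []
  rw [pvInnerFold cs cs.length 0 j st.1 st.2 (by simp) le_rfl]
  rw [if_pos (show (0 : Int) ≤ (j : Int) + 1 by omega)]
  simp [pvStepA]

-- inside a maximal run [i, j), the chain length at p is the distance to the run's last cell
lemma pvExt_in_run (cs : List Char) (ch : Char) (i j : Nat)
    (hrun : ∀ p, i ≤ p → p < j → cs[p]? = some ch)
    (hstop : ¬ (j < cs.length ∧ cs[j]? = some ch)) :
    ∀ (m p : Nat), j - p ≤ m → i ≤ p → p < j → pvExt cs p = j - 1 - p := by
  intro m
  induction m with
  | zero => intro p hm hip hpj; omega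
  | succ m ih =>
    intro p hm hip hpj
    by_cases hlast : p + 1 = j
    · have he : pvExt cs p = 0 := by
        apply pvExt_eq_zero
        intro ⟨h1, h2⟩
        rw [hrun p hip hpj] at h2
        rw [hlast] at h2 h1
        exact hstop ⟨h1, h2⟩
      omega
    · have hp1 : p + 1 < j := by omega
      have hc1 : cs[p+1]? = some ch := hrun (p + 1) (by omega) hp1
      have hlen : p + 1 < cs.length := by
        by_contra hc
        rw [List.getElem?_eq_none (by omega)] at hc1
        simp at hc1
      have hext : pvExt cs p = pvExt cs (p + 1) + 1 :=
        pvExt_eq_succ cs p ⟨hlen, by rw [hc1, hrun p hip hpj]⟩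
      have := ih (p + 1) (by omega) (by omega) hp1
      omega

-- folding A's abstract step across one maximal run adds the triangular pair count
lemma pvSegFold (cs : List Char) (i j : Nat)
    (hext : ∀ p, i ≤ p → p < j → pvExt cs p = j - 1 - p) :
    ∀ (m p : Nat) (c : Int) (w : String), j - p ≤ m → i ≤ p → p ≤ j →
      (PySem.List.pyRange (p : Int) (j : Int) 1).foldl (pvStepA cs) (c, w)
      = (c + (pvT (j - p) : Int),
         if p + 1 < j then pvWchar cs ((j - 1 : Nat) : Int) else w) := by
  intro m
  induction m with
  | zero =>
    intro p c w hm hip hpj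
    have hpj' : p = j := by omega
    subst hpj'
    rw [PySem.List.pyRange_one_eq_nil (by omega)]
    simp [pvT]
  | succ m ih =>
    intro p c w hm hip hpj
    by_cases hpe : p = j
    · subst hpe
      rw [PySem.List.pyRange_one_eq_nil (by omega)]
      simp [pvT]
    · have hplt : p < j := by omega
      rw [PySem.List.pyRange_one_cons (by exact_mod_cast hplt)]
      simp only [List.foldl_cons]
      have hstep : pvStepA cs (c, w) ((p : Nat) : Int)
          = (c + ((j - 1 - p : Nat) : Int),
             if p + 1 = j then w else pvWchar cs ((j - 1 : Nat) : Int)) := by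
        unfold pvStepA
        rw [show ((p : Nat) : Int).toNat = p by simp]
        rw [hext p hip hplt]
        by_cases hl : p + 1 = j
        · rw [if_pos (by omega), if_pos hl]
        · rw [if_neg (by omega), if_neg hl]
          rw [show (p + (j - 1 - p) : Nat) = j - 1 by omega]
      rw [hstep]
      rw [show ((p : Nat) : Int) + 1 = ((p + 1 : Nat) : Int) by push_cast; ring]
      rw [ih (p + 1) _ _ (by omega) (by omega) (by omega)]
      have hT : (pvT (j - (p + 1)) : Int) + ((j - 1 - p : Nat) : Int) = (pvT (j - p) : Int) := by
        have h1 : j - p = (j - (p + 1)) + 1 := by omega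
        rw [h1, pvT]
        have h2 : j - 1 - p = j - (p + 1) := by omega
        rw [h2]
        push_cast; ring
      refine Prod.ext ?_ ?_
      · show c + ((j - 1 - p : Nat) : Int) + (pvT (j - (p + 1)) : Int) = c + (pvT (j - p) : Int)
        rw [← hT]; ring
      · show (if p + 1 + 1 < j then pvWchar cs ((j - 1 : Nat) : Int)
              else if p + 1 = j then w else pvWchar cs ((j - 1 : Nat) : Int))
            = if p + 1 < j then pvWchar cs ((j - 1 : Nat) : Int) else w
        by_cases h2 : p + 1 + 1 < j
        · rw [if_pos h2, if_pos (by omega)]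
        · by_cases h3 : p + 1 = j
          · rw [if_neg h2, if_pos h3, if_neg (by omega)]
          · rw [if_neg h2, if_neg h3, if_pos (by omega)]

-- the closed-form pair count equals the triangular number
lemma pvT_floordiv (L : Nat) :
    PySem.Int.floordiv ((L : Int) * ((L : Int) - 1)) 2 = (pvT L : Int) := by
  have h2 : (L : Int) * ((L : Int) - 1) = 2 * (pvT L : Int) := by
    induction L with
    | zero => simp [pvT]
    | succ n ih =>
      rw [pvT]
      push_cast
      push_cast at ih
      nlinarith [ih]
  rw [h2, PySem.Int.floordiv_eq_ediv_of_pos (by norm_num)]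
  exact Int.mul_ediv_cancel_left _ (by norm_num)

-- the first pvRunLen characters all equal the run character
lemma pvRunLen_lt (ch : Char) : ∀ (t : List Char) (k : Nat), k < pvRunLen ch t → t[k]? = some ch := by
  intro t
  induction t with
  | nil => intro k hk; simp [pvRunLen] at hk
  | cons c t ih =>
    intro k hk
    by_cases hc : c = ch
    · cases k with
      | zero => simp [hc]
      | succ k =>
        simp only [pvRunLen, if_pos hc] at hk
        simpa using ih k (by omega)
    · simp [pvRunLen, hc] at hk

-- the run really stops after pvRunLen characters
lemma pvRunLen_stop (ch : Char) : ∀ (t : List Char), ¬ (t[pvRunLen ch t]? = some ch) := by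
  intro t
  induction t with
  | nil => simp [pvRunLen]
  | cons c t ih =>
    by_cases hc : c = ch
    · simpa [pvRunLen, hc] using ih
    · simp [pvRunLen, hc]

-- MAIN: A's abstract fold from any position equals B's run loop on the matching suffix
lemma pvMain (cs : List Char) :
    ∀ (fuel i : Nat) (c : Int) (w : String), cs.length - i ≤ fuel → i ≤ cs.length →
      (PySem.List.pyRange (i : Int) (cs.length : Int) 1).foldl (pvStepA cs) (c, w)
      = pvRunLoopF fuel (cs.drop i) c w := by
  intro fuel
  induction fuel with
  | zero =>
    intro i c w hm hle
    have hi : i = cs.length := by omega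
    rw [PySem.List.pyRange_one_eq_nil (by omega)]
    rw [List.drop_eq_nil_of_le (by omega)]
    simp [pvRunLoopF]
  | succ fuel ih =>
    intro i c w hm hle
    by_cases hi : i < cs.length
    · have hdrop : cs.drop i = cs[i] :: cs.drop (i + 1) := (List.getElem_cons_drop hi).symm
      set ch := cs[i] with hch
      set t := cs.drop (i + 1) with ht
      set RL := pvRunLen ch t with hRL
      set j := i + 1 + RL with hj
      have htk : ∀ k, t[k]? = cs[i + 1 + k]? := by
        intro k; rw [ht, List.getElem?_drop]
      have hrun : ∀ p, i ≤ p → p < j → cs[p]? = some ch := by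
        intro p hip hpj
        by_cases hpi : p = i
        · subst hpi; exact List.getElem?_eq_getElem hi
        · have h1 : t[p - i - 1]? = some ch := pvRunLen_lt ch t (p - i - 1) (by omega)
          rw [htk] at h1
          rw [show i + 1 + (p - i - 1) = p by omega] at h1
          exact h1
      have hstop2 : ¬ (cs[j]? = some ch) := by
        have := pvRunLen_stop ch t
        rw [htk] at this
        exact this
      have hext : ∀ p, i ≤ p → p < j → pvExt cs p = j - 1 - p :=
        fun p hip hpj => pvExt_in_run cs ch i j hrun (fun h => hstop2 h.2) j p (by omega) hip hpj
      have hjlen : j ≤ cs.length := by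
        by_contra hc
        have : cs[j - 1]? = some ch := hrun (j - 1) (by omega) (by omega)
        rw [List.getElem?_eq_none (by omega)] at this
        simp at this
      -- split A's range at the run end and fold across the run [i, j)
      rw [PySem.List.pyRange_one_append (i : Int) (j : Int) (cs.length : Int)
            (by exact_mod_cast (by omega : i ≤ j)) (by exact_mod_cast hjlen)]
      rw [List.foldl_append]
      rw [pvSegFold cs i j hext j i c w (by omega) (by omega) (by omega)]
      rw [ih j _ _ (by omega) hjlen]
      -- B's side: one step of the run loop
      rw [hdrop]
      show _ = pvRunLoopF (fuel + 1) (ch :: t) c w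
      rw [pvRunLoopF]
      simp only [← hRL]
      have hLdrop : (ch :: t).drop (RL + 1) = cs.drop j := by
        rw [← hdrop, List.drop_drop, show i + (RL + 1) = j by omega]
      rw [hLdrop]
      by_cases hij1 : i + 1 < j
      · rw [if_pos (show 1 < RL + 1 by omega), if_pos hij1]
        congr 1
        · congr 1
          rw [show ((RL + 1 : Nat) : Int) * (((RL + 1 : Nat) : Int) - 1)
                = ((j - i : Nat) : Int) * (((j - i : Nat) : Int) - 1) by
              rw [show (j - i : Nat) = RL + 1 by omega]]
          rw [pvT_floordiv (j - i)]
        · unfold pvWchar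
          rw [PySem.List.pyGet?_natCast]
          rw [hrun (j - 1) (by omega) (by omega)]
          rfl
      · rw [if_neg (show ¬ (1 < RL + 1) by omega), if_neg hij1]
        have hj1 : j - i = 1 := by omega
        rw [hj1]
        norm_num [pvT]
    · have hi' : i = cs.length := by omega
      rw [PySem.List.pyRange_one_eq_nil (by omega)]
      rw [List.drop_eq_nil_of_le (by omega)]
      simp [pvRunLoopF]

-- ===== VERDICT (by name: the statement is the Claim_ definition above) =====
theorem countSingleWord_spec : Claim_equal_countSingleWord := by
  intro name _
  unfold Spec_countSingleWord countSingleWord countSingleWord_alt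
  simp only []
  have hA :
      (PySem.List.pyRange 0 (name.toList.length : Int) 1).foldl
        (fun (st : Int × String) i =>
          let inner :=
            (PySem.List.pyRange 0 (name.toList.length : Int) 1).foldl
              (fun (st2 : Int × Int × String) y =>
                if PySem.List.pyGet? name.toList y = PySem.List.pyGet? name.toList st2.1 ∧ y = st2.1 + 1 then
                  (y, st2.2.1 + 1, ((PySem.List.pyGet? name.toList y).map (fun c => String.mk [c])).getD "")
                else st2)
              (i, st.1, st.2)
          (inner.2.1, inner.2.2))
        ((1 : Int), "")
      = (PySem.List.pyRange 0 (name.toList.length : Int) 1).foldl (pvStepA name.toList) ((1 : Int), "") := by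
    refine PySem.List.foldl_congr_mem _ _ _ _ ?_
    intro acc x hx
    exact pvOuterStep name.toList acc x ((PySem.List.mem_pyRange_one.mp hx).1)
  rw [hA]
  rw [show (0 : Int) = ((0 : Nat) : Int) by simp]
  rw [pvMain name.toList name.toList.length 0 1 "" (by omega) (by omega)]
  rw [List.drop_zero]
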